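-- pv_equiv track=rewrite | github.com/saideeptiku/rbf | RBF.py | __build_coord_vectors__
-- ===== SOURCE A (Python) =====
-- def __build_coord_vectors__(db_vector_sorted, online_vector_sorted):
--     """
--     convert sorted vectors into the form of coordinates
--     this is the main crux of the algorithm described in the paper
--     :param db_vector_sorted:
--     :param online_vector_sorted:
--     :return:
--     """
--
--     # coordinate vectors for online sorted vector and this training DB vector
--     cord_db_vector = [0 for _ in db_vector_sorted]
--     cord_online_vector = list(range(1, len(online_vector_sorted) + 1))
--
--     # iterate over elements in sorted_vector
--     for i in range(len(online_vector_sorted)):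
--         online_ap = online_vector_sorted[i]
--
--         # get position of online_AP in this vector of DB
--         try:
--             train_sv_i = db_vector_sorted.index(online_ap)
--         except ValueError:
--             # an AP in online phase not present in offline phase
--             # ignore this
--             continue
--
--         # rank is one more than index
--         rank = cord_online_vector[i]
--
--         # put rank at index in cord_db_vector
--         # populate train vector
--         cord_db_vector[train_sv_i] = rank
--
--     # check if both co-ord lengths are same
--     # Note: In the case one or more AP are not found in the training DB,
--     # The rank vector found in the radio map is padded with 0,
--     # to achieve the same length.
--
--     if len(cord_db_vector) > len(cord_online_vector):
--         # add zeros to online vector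
--         len_diff = len(cord_db_vector) - len(cord_online_vector)
--         zero_vec = [0 for _ in range(len_diff)]
--         cord_online_vector = cord_online_vector + zero_vec
--
--     elif len(cord_db_vector) < len(cord_online_vector):
--         # add zeros to db vector
--         len_diff = len(cord_online_vector) - len(cord_db_vector)
--         zero_vec = [0 for _ in range(len_diff)]
--         cord_db_vector = cord_db_vector + zero_vec
--
--     # finally check if they are equal and exit if not equal
--     if len(cord_db_vector) != len(cord_online_vector):
--         exit("error in making coordinates from vectors!")
--
--     return cord_db_vector, cord_online_vector
-- ===== SOURCE B (Python) =====
-- def __build_coord_vectors__(db_vector_sorted, online_vector_sorted):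
--     """
--     Same result as A, built the other way round: a rank table keyed by the
--     online values (last rank wins, like A's overwriting loop) and a single
--     pass over the db vector, instead of an .index scan per online element.
--     """
--     cord_online_vector = list(range(1, len(online_vector_sorted) + 1))
--
--     # rank of each online value; later duplicates overwrite earlier ones
--     rank = {}
--     for i, v in enumerate(online_vector_sorted):
--         rank[v] = i + 1
--
--     # one pass over db: only the first occurrence of a value gets its rank
--     cord_db_vector = []
--     seen = set()
--     for v in db_vector_sorted:
--         if v not in seen and v in rank:
--             cord_db_vector.append(rank[v])
--         else:
--             cord_db_vector.append(0)
--         seen.add(v)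
--
--     # pad the shorter vector with zeros so both have the same length
--     n = max(len(cord_db_vector), len(cord_online_vector))
--     cord_db_vector = cord_db_vector + [0] * (n - len(cord_db_vector))
--     cord_online_vector = cord_online_vector + [0] * (n - len(cord_online_vector))
--
--     return cord_db_vector, cord_online_vector
-- ===== Notes on version B (the rewrite author's own statement) =====
-- stated objective: faster
-- what changed: Replaces the per-online-element db.index scan with a rank dict built from the online vector plus one pass over the db vector with a seen set (first db occurrence gets the rank), and folds the two padding branches into one max-length padding.
import Mathlib
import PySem

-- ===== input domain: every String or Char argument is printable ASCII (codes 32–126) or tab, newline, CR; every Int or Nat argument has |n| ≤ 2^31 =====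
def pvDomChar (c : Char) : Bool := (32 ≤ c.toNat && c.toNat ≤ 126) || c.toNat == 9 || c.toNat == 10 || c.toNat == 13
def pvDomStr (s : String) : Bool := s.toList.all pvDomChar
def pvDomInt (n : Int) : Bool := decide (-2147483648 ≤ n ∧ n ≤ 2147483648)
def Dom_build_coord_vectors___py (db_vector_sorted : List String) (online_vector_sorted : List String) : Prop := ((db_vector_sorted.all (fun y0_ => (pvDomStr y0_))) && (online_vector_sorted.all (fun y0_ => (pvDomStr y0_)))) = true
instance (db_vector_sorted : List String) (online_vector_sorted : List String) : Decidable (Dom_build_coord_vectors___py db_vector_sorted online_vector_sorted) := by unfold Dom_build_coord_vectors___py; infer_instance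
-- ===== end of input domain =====

-- B replaces A's per-online-element db.index scan by a rank dict over the online
-- vector plus one pass over the db vector with a seen set (objective: faster).

-- ===== PORT A =====
-- A's search loop: for i, v over online, try db.index(v), put rank i+1 there.
def pvALoop (db : List String) (online : List (Int × String)) (acc : List Int) : List Int :=
  online.foldl (fun acc iv =>
    match PySem.List.index? db iv.2 with
    | some k => acc.set k (iv.1 + 1)   -- rank = cord_online_vector[i] = i + 1
    | none => acc)                      -- ValueError: continue
    acc

def build_coord_vectors___py (db_vector_sorted : List String) (online_vector_sorted : List String) : List Int × List Int :=
  let cord_db : List Int := db_vector_sorted.map (fun _ => 0)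
  let cord_online : List Int := PySem.List.pyRange 1 ((online_vector_sorted.length : Int) + 1) 1
  let cord_db := pvALoop db_vector_sorted (PySem.List.enumerate online_vector_sorted 0) cord_db
  -- padding; the final exit() check is unreachable (lengths are equal after padding)
  if cord_db.length > cord_online.length then
    (cord_db, cord_online ++ List.replicate (cord_db.length - cord_online.length) (0 : Int))
  else if cord_db.length < cord_online.length then
    (cord_db ++ List.replicate (cord_online.length - cord_db.length) (0 : Int), cord_online)
  else (cord_db, cord_online)

-- ===== PORT B =====
-- Source B's rank-building loop: rank[v] = i + 1 (later duplicates overwrite)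
def pvBRank (online : List (Int × String)) : PySem.Dict String Int :=
  online.foldl (fun d iv => d.insert iv.2 (iv.1 + 1)) PySem.Dict.empty

-- Source B's single pass over db with a seen set
def pvBStep (rank : PySem.Dict String Int) (st : List Int × PySem.Set String) (v : String) :
    List Int × PySem.Set String :=
  (st.1 ++ [if !(st.2.contains v) && rank.contains v then rank.getD v 0 else 0],
   PySem.Set.add st.2 v)

def build_coord_vectors___py_alt (db_vector_sorted : List String) (online_vector_sorted : List String) : List Int × List Int :=
  let cord_online : List Int := PySem.List.pyRange 1 ((online_vector_sorted.length : Int) + 1) 1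
  let rank := pvBRank (PySem.List.enumerate online_vector_sorted 0)
  let cord_db := (db_vector_sorted.foldl (pvBStep rank) ([], PySem.Set.empty)).1
  let n := max cord_db.length cord_online.length
  (cord_db ++ List.replicate (n - cord_db.length) (0 : Int),
   cord_online ++ List.replicate (n - cord_online.length) (0 : Int))

-- ===== PRECONDITION & SPEC =====
def Spec_build_coord_vectors___py (db_vector_sorted : List String) (online_vector_sorted : List String) (out : List Int × List Int) : Prop := out = build_coord_vectors___py_alt db_vector_sorted online_vector_sorted
instance (db_vector_sorted : List String) (online_vector_sorted : List String) (out : List Int × List Int) : Decidable (Spec_build_coord_vectors___py db_vector_sorted online_vector_sorted out) := by unfold Spec_build_coord_vectors___py; infer_instance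

-- ===== CLAIM (what is proved, stated in full; the proofs are below) =====
def Claim_equal_build_coord_vectors___py : Prop := ∀ (db_vector_sorted : List String) (online_vector_sorted : List String), Dom_build_coord_vectors___py db_vector_sorted online_vector_sorted → Spec_build_coord_vectors___py db_vector_sorted online_vector_sorted (build_coord_vectors___py db_vector_sorted online_vector_sorted)

-- ===== LEMMAS AND PROOFS =====

-- last-rank function: rank (offset by i0) of the LAST occurrence of v in online
def pvLR : List String → Int → String → Option Int
  | [], _, _ => none
  | w :: rest, i0, v =>
    match pvLR rest (i0 + 1) v with
    | some r => some r
    | none => if w = v then some (i0 + 1) else none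

lemma pvALoop_length (db : List String) (online : List (Int × String)) (acc : List Int) :
    (pvALoop db online acc).length = acc.length := by
  induction online generalizing acc with
  | nil => rfl
  | cons iv rest ih =>
    have step : pvALoop db (iv :: rest) acc =
        pvALoop db rest (match PySem.List.index? db iv.2 with
          | some k => acc.set k (iv.1 + 1)
          | none => acc) := rfl
    rw [step]
    cases hk : PySem.List.index? db iv.2 <;> simp only [hk] <;> rw [ih] <;> simp

lemma pvALoop_get (db : List String) (online : List String) (i0 : Int) (acc : List Int)
    (hlen : acc.length = db.length) (j : Nat) (hj : j < db.length) :
    (pvALoop db (PySem.List.enumerate online i0) acc)[j]? =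
      some ((if PySem.List.index? db (db[j]'hj) = some j then pvLR online i0 (db[j]'hj) else none).getD
        (acc[j]'(hlen ▸ hj))) := by
  induction online generalizing i0 acc with
  | nil =>
    simp only [PySem.List.enumerate_nil, pvALoop, List.foldl_nil]
    rw [List.getElem?_eq_getElem (hlen ▸ hj)]
    congr 1
    split <;> rfl
  | cons w rest ih =>
    rw [PySem.List.enumerate_cons]
    have step : pvALoop db ((i0, w) :: PySem.List.enumerate rest (i0 + 1)) acc =
        pvALoop db (PySem.List.enumerate rest (i0 + 1))
          (match PySem.List.index? db w with
           | some k => acc.set k (i0 + 1)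
           | none => acc) := rfl
    cases hk : PySem.List.index? db w with
    | none =>
      rw [step]
      simp only [hk]
      rw [ih (i0 + 1) acc hlen]
      congr 1
      by_cases hc : PySem.List.index? db (db[j]'hj) = some j
      · rw [if_pos hc, if_pos hc]
        cases hlr : pvLR rest (i0 + 1) (db[j]'hj) with
        | some r => simp [pvLR, hlr]
        | none =>
          have hw : ¬ w = db[j]'hj := by
            intro he
            rw [he, hc] at hk
            cases hk
          simp [pvLR, hlr, hw]
      · rw [if_neg hc, if_neg hc]
    | some k =>
      rw [step]
      simp only [hk]
      have hlen' : (acc.set k (i0 + 1)).length = db.length := by simp [hlen]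
      rw [ih (i0 + 1) _ hlen']
      congr 1
      obtain ⟨hk', hdbk, _⟩ := PySem.List.getElem_of_index?_eq_some hk
      by_cases hc : PySem.List.index? db (db[j]'hj) = some j
      · rw [if_pos hc, if_pos hc]
        cases hlr : pvLR rest (i0 + 1) (db[j]'hj) with
        | some r => simp [pvLR, hlr]
        | none =>
          simp only [pvLR, hlr, Option.getD_none]
          by_cases hw : w = db[j]'hj
          · have hkj : k = j := by
              rw [hw, hc] at hk
              exact (Option.some.inj hk).symm
            subst hkj
            simp [hw]
          · rw [if_neg hw, Option.getD_none]
            have hkj : k ≠ j := by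
              intro he
              subst he
              exact hw hdbk.symm
            simp [List.getElem_set, hkj]
      · rw [if_neg hc, if_neg hc, Option.getD_none, Option.getD_none]
        have hkj : k ≠ j := by
          intro he
          subst he
          refine hc ?_
          rw [hdbk]
          exact hk
        simp [List.getElem_set, hkj]

-- B's pass, cons-recursive shape
def pvG (rank : PySem.Dict String Int) : List String → PySem.Set String → List Int
  | [], _ => []
  | v :: rest, seen =>
    (if !(seen.contains v) && rank.contains v then rank.getD v 0 else 0) ::
      pvG rank rest (PySem.Set.add seen v)

lemma pvBFold_eq (rank : PySem.Dict String Int) (dbl : List String) (acc : List Int)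
    (seen : PySem.Set String) :
    (dbl.foldl (pvBStep rank) (acc, seen)).1 = acc ++ pvG rank dbl seen := by
  induction dbl generalizing acc seen with
  | nil => simp [pvG]
  | cons v rest ih =>
    simp only [List.foldl_cons, pvBStep, pvG]
    rw [ih]
    simp

lemma pvG_length (rank : PySem.Dict String Int) (dbl : List String) (seen : PySem.Set String) :
    (pvG rank dbl seen).length = dbl.length := by
  induction dbl generalizing seen with
  | nil => rfl
  | cons v rest ih => simp [pvG, ih]

lemma pvG_get (rank : PySem.Dict String Int) (dbl : List String) (seen : PySem.Set String)
    (j : Nat) (hj : j < dbl.length) :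
    (pvG rank dbl seen)[j]'(by rw [pvG_length]; exact hj) =
      if (dbl[j]'hj) ∉ seen ∧ (dbl[j]'hj) ∉ dbl.take j ∧ rank.contains (dbl[j]'hj) = true
      then rank.getD (dbl[j]'hj) 0 else 0 := by
  induction dbl generalizing seen j with
  | nil => exact absurd hj (by simp)
  | cons v rest ih =>
    cases j with
    | zero =>
      simp only [pvG, List.getElem_cons_zero, List.take_zero, List.not_mem_nil,
        not_false_iff, true_and]
      by_cases hs : v ∈ seen
      · have h1 : seen.contains v = true := (PySem.Set.contains_iff seen v).mpr hs
        simp [h1, hs]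
      · have h1 : seen.contains v = false := by
          cases h : seen.contains v
          · rfl
          · exact absurd ((PySem.Set.contains_iff seen v).mp h) hs
        by_cases hr : rank.contains v = true
        · simp [hr, hs]
        · simp [hr, hs]
    | succ j' =>
      have hj' : j' < rest.length := by simpa using hj
      simp only [pvG, List.getElem_cons_succ]
      rw [ih (PySem.Set.add seen v) j' hj']
      have hmem : (rest[j']'hj') ∉ PySem.Set.add seen v ↔
          (rest[j']'hj') ∉ seen ∧ (rest[j']'hj') ≠ v := by
        rw [PySem.Set.mem_add]; tauto
      have htake : (rest[j']'hj') ∉ (v :: rest).take (j' + 1) ↔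
          (rest[j']'hj') ≠ v ∧ (rest[j']'hj') ∉ rest.take j' := by
        simp [List.take_succ_cons]
      apply if_congr _ rfl rfl
      rw [hmem, htake]; tauto

-- the rank dict computes the last rank
lemma pvBRank_get (online : List String) (i0 : Int) (d : PySem.Dict String Int) (v : String) :
    ((PySem.List.enumerate online i0).foldl (fun d iv => d.insert iv.2 (iv.1 + 1)) d).get? v =
      match pvLR online i0 v with
      | some r => some r
      | none => d.get? v := by
  induction online generalizing i0 d with
  | nil => simp [pvLR]
  | cons w rest ih =>
    rw [PySem.List.enumerate_cons, List.foldl_cons, ih]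
    cases hlr : pvLR rest (i0 + 1) v with
    | some r => simp [pvLR, hlr]
    | none =>
      simp only [pvLR, hlr]
      rw [PySem.Dict.get?_insert]
      by_cases hw : w = v
      · subst hw; simp
      · simp [hw, Ne.symm hw]

-- first occurrence at j  ↔  index? finds j
lemma pv_first_occ (db : List String) (j : Nat) (hj : j < db.length) :
    PySem.List.index? db (db[j]'hj) = some j ↔ (db[j]'hj) ∉ db.take j := by
  constructor
  · intro h
    obtain ⟨_, _, hfirst⟩ := PySem.List.getElem_of_index?_eq_some h
    intro hmem
    obtain ⟨i, hi, hgi⟩ := List.getElem_of_mem hmem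
    have hi' : i < j := by
      have := List.length_take_le j db; omega
    rw [List.getElem_take] at hgi
    exact hfirst i hi' hgi
  · intro hnot
    rw [PySem.List.index?_eq_some_iff]
    refine ⟨db.take j, db.drop (j + 1), ?_, by simp [List.length_take]; omega, hnot⟩
    conv_lhs => rw [← List.take_append_drop j db]
    congr 1
    rw [List.drop_eq_getElem_cons hj]

-- the two pre-padding cord_db vectors agree
lemma pv_core (db online : List String) :
    pvALoop db (PySem.List.enumerate online 0) (db.map (fun _ => (0 : Int))) =
      (db.foldl (pvBStep (pvBRank (PySem.List.enumerate online 0))) ([], PySem.Set.empty)).1 := by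
  rw [pvBFold_eq, List.nil_append]
  apply List.ext_getElem
  · rw [pvALoop_length, pvG_length, List.length_map]
  · intro j hja hjb
    have hj : j < db.length := by rwa [pvALoop_length, List.length_map] at hja
    have hA : (pvALoop db (PySem.List.enumerate online 0) (db.map (fun _ => (0 : Int))))[j]'hja =
        (if PySem.List.index? db (db[j]'hj) = some j then pvLR online 0 (db[j]'hj) else none).getD
          ((db.map (fun _ => (0 : Int)))[j]'(by simpa using hj)) := by
      have h := pvALoop_get db online 0 (db.map (fun _ => (0 : Int))) (by simp) j hj
      rwa [List.getElem?_eq_getElem hja, Option.some_inj] at h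
    rw [hA, pvG_get _ _ _ j hj]
    have hget0 : (db.map (fun _ => (0 : Int)))[j]'(by simpa using hj) = 0 := by simp
    rw [hget0]
    have hrank : (pvBRank (PySem.List.enumerate online 0)).get? (db[j]'hj) =
        pvLR online 0 (db[j]'hj) := by
      rw [pvBRank, pvBRank_get]
      cases pvLR online 0 (db[j]'hj) <;> simp [PySem.Dict.get?_empty]
    by_cases hc : PySem.List.index? db (db[j]'hj) = some j
    · rw [if_pos hc]
      have htake := (pv_first_occ db j hj).mp hc
      cases hlr : pvLR online 0 (db[j]'hj) with
      | none =>
        have : (pvBRank (PySem.List.enumerate online 0)).contains (db[j]'hj) = false := by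
          rw [PySem.Dict.contains_eq_isSome_get?, hrank, hlr]; rfl
        simp [this]
      | some r =>
        have hcon : (pvBRank (PySem.List.enumerate online 0)).contains (db[j]'hj) = true := by
          rw [PySem.Dict.contains_eq_isSome_get?, hrank, hlr]; rfl
        have hgd : (pvBRank (PySem.List.enumerate online 0)).getD (db[j]'hj) 0 = r := by
          rw [PySem.Dict.getD_eq_get?_getD, hrank, hlr]; rfl
        rw [if_pos ⟨List.not_mem_nil, htake, hcon⟩, hgd]; rfl
    · rw [if_neg hc]
      have htake : ¬ (db[j]'hj) ∉ db.take j := fun h => hc ((pv_first_occ db j hj).mpr h)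
      rw [if_neg (by tauto)]; rfl

-- ===== VERDICT (by name: the statement is the Claim_ definition above) =====
theorem build_coord_vectors___py_spec : Claim_equal_build_coord_vectors___py := by
  intro db online _
  unfold Spec_build_coord_vectors___py build_coord_vectors___py build_coord_vectors___py_alt
  simp only []
  rw [pv_core db online]
  set cdb := (db.foldl (pvBStep (pvBRank (PySem.List.enumerate online 0))) ([], PySem.Set.empty)).1 with hcdb
  set con := PySem.List.pyRange 1 ((online.length : Int) + 1) 1 with hcon
  rcases Nat.lt_trichotomy con.length cdb.length with h | h | h
  · rw [if_pos h]
    have h1 : max cdb.length con.length = cdb.length := by omega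
    have h2 : cdb.length - cdb.length = 0 := by omega
    rw [h1, h2, List.replicate_zero, List.append_nil]
  · rw [if_neg (by omega), if_neg (by omega)]
    rw [h, Nat.max_self, Nat.sub_self, List.replicate_zero, List.append_nil, List.append_nil]
  · rw [if_neg (by omega), if_pos h]
    have h1 : max cdb.length con.length = con.length := by omega
    have h2 : con.length - con.length = 0 := by omega
    rw [h1, h2, List.replicate_zero, List.append_nil]
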